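-- pv_equiv track=rewrite | github.com/RomainChiaraviglio/Poker | data_generator.py | paire
-- ===== SOURCE A (Python) =====
-- def paire(num):
-- 	list_paire = []
-- 	for n in set(num):
-- 		if num.count(n) == 2:
-- 			list_paire.append(n)
-- 	if len(list_paire) > 1:
-- 		return [sorted(list_paire)[-1], sorted(list_paire)[-2]]
-- 	elif len(list_paire) == 1:
-- 		return list_paire
-- 	return None
-- ===== SOURCE B (Python) =====
-- def paire(num):
--     s = sorted(num)
--     pairs = []
--     i = 0
--     n = len(s)
--     while i < n:
--         j = i
--         while j < n and s[j] == s[i]: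
--             j += 1
--         if j - i == 2:
--             pairs.append(s[i])
--         i = j
--     if len(pairs) > 1:
--         return [pairs[-1], pairs[-2]]
--     elif len(pairs) == 1:
--         return pairs
--     return None
-- ===== Notes on version B (the rewrite author's own statement) =====
-- stated objective: faster
-- what changed: Replaces A's per-distinct-value num.count scan over set(num) by sorting once and scanning the sorted list, grouping consecutive equal values into runs and collecting ranks whose run length is exactly 2 (already in ascending order).
import Mathlib
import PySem

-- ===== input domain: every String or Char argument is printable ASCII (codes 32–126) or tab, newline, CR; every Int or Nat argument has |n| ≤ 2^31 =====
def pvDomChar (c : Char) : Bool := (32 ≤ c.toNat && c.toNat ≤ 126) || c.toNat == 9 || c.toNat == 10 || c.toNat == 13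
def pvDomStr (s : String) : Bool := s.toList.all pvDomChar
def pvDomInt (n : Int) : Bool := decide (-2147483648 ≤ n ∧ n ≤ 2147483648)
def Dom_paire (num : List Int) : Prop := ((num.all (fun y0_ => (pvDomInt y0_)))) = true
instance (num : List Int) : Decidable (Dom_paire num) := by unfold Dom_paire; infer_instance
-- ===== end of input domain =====

-- B sorts once and scans runs instead of counting each distinct value over the whole list; return value is identical.

-- ===== PORT A =====
-- A: iterate over set(num), collect values with count 2, branch on how many were found.
def paire (num : List Int) : Option (List Int) :=
  let list_paire : List Int :=
    (PySem.Set.ofList num).foldl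
      (fun acc n => if (PySem.List.count num n == 2) then acc ++ [n] else acc) []
  if list_paire.length > 1 then
    -- sorted(list_paire)[-1] / [-2]; the indices are in range when length > 1, so getD's default is never used
    some [(PySem.List.pyGet? (PySem.List.sorted list_paire (fun x => x) false) (-1)).getD 0,
          (PySem.List.pyGet? (PySem.List.sorted list_paire (fun x => x) false) (-2)).getD 0]
  else if list_paire.length = 1 then some list_paire
  else none

-- ===== PORT B =====
-- B's inner while loop: one run of equal values at the head is consumed per step.
def collectPairs : List Int → List Int
  | [] => []
  | x :: xs =>
    let run := xs.takeWhile (fun y => y == x)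
    let rest := xs.dropWhile (fun y => y == x)
    if run.length + 1 = 2 then x :: collectPairs rest else collectPairs rest
termination_by l => l.length
decreasing_by
  all_goals exact Nat.lt_succ_of_le (List.length_dropWhile_le _ _)

def paire_alt (num : List Int) : Option (List Int) :=
  let pairs := collectPairs (PySem.List.sorted num (fun x => x) false)
  if pairs.length > 1 then
    some [(PySem.List.pyGet? pairs (-1)).getD 0, (PySem.List.pyGet? pairs (-2)).getD 0]
  else if pairs.length = 1 then some pairs
  else none

-- ===== PRECONDITION & SPEC =====
def Spec_paire (num : List Int) (out : Option (List Int)) : Prop := out = paire_alt num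
instance (num : List Int) (out : Option (List Int)) : Decidable (Spec_paire num out) := by unfold Spec_paire; infer_instance

-- ===== CLAIM (what is proved, stated in full; the proofs are below) =====
def Claim_equal_paire : Prop := ∀ (num : List Int), Dom_paire num → Spec_paire num (paire num)

-- ===== LEMMAS AND PROOFS =====

-- every element of the dropWhile tail is strictly greater than x (on a sorted list whose elements are all ≥ x)
lemma dropWhile_gt (x : Int) :
    ∀ (xs : List Int), xs.Pairwise (· ≤ ·) → (∀ y ∈ xs, x ≤ y) →
      ∀ y ∈ xs.dropWhile (fun y => y == x), x < y := by
  intro xs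
  induction xs with
  | nil => intro _ _ y hy; simp [List.dropWhile] at hy
  | cons z zs ih =>
    intro hp hge y hy
    rw [List.pairwise_cons] at hp
    by_cases hz : z = x
    · subst hz
      rw [List.dropWhile_cons_of_pos (by simp)] at hy
      exact ih hp.2 (fun y hy' => hp.1 y hy') y hy
    · rw [List.dropWhile_cons_of_neg (by simp [hz])] at hy
      have hxz : x < z := lt_of_le_of_ne (hge z (by simp)) (fun h => hz h.symm)
      rcases List.mem_cons.mp hy with rfl | hy
      · exact hxz
      · exact lt_of_lt_of_le hxz (hp.1 y hy)

-- unfolding lemma for the cons case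
lemma collectPairs_cons (x : Int) (xs : List Int) :
    collectPairs (x :: xs) =
      if (List.takeWhile (fun y => y == x) xs).length + 1 = 2 then
        x :: collectPairs (List.dropWhile (fun y => y == x) xs)
      else collectPairs (List.dropWhile (fun y => y == x) xs) := by
  rw [collectPairs]

-- one step of the run-grouping scan
lemma collectPairs_step (x : Int) (xs : List Int)
    (ih : (List.dropWhile (fun y => y == x) xs).Pairwise (· ≤ ·) →
      (∀ y, y ∈ collectPairs (List.dropWhile (fun y => y == x) xs) ↔
        (List.dropWhile (fun y => y == x) xs).count y = 2) ∧
      (collectPairs (List.dropWhile (fun y => y == x) xs)).Pairwise (· < ·)) :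
    (x :: xs).Pairwise (· ≤ ·) →
      (∀ y, y ∈ collectPairs (x :: xs) ↔ (x :: xs).count y = 2) ∧
      (collectPairs (x :: xs)).Pairwise (· < ·) := by
  intro hp
  set run := List.takeWhile (fun y => y == x) xs with hrundef
  set rest := List.dropWhile (fun y => y == x) xs with hrestdef
  rw [List.pairwise_cons] at hp
  have hge : ∀ y ∈ xs, x ≤ y := hp.1
  have hrest_sorted : rest.Pairwise (· ≤ ·) :=
    hp.2.sublist (List.dropWhile_sublist _)
  have hgt : ∀ y ∈ rest, x < y := dropWhile_gt x xs hp.2 hge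
  obtain ⟨ihm, ihp⟩ := ih hrest_sorted
  have hrun : ∀ y ∈ run, y = x := by
    intro y hy
    have := List.mem_takeWhile_imp hy
    simpa using this
  have hsplit : xs = run ++ rest := (List.takeWhile_append_dropWhile).symm
  have hcount_run_x : run.count x = run.length := by
    rw [List.count_eq_length]
    intro b hb; exact (hrun b hb).symm
  have hcount_rest_x : rest.count x = 0 := by
    rw [List.count_eq_zero]
    intro h; exact absurd rfl (ne_of_gt (hgt x h))
  have hx_count : (x :: xs).count x = run.length + 1 := by
    rw [hsplit, List.count_cons_self, List.count_append, hcount_run_x, hcount_rest_x]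
  have hy_count : ∀ y, y ≠ x → (x :: xs).count y = rest.count y := by
    intro y hne
    rw [hsplit]
    have hzero : run.count y = 0 := List.count_eq_zero.mpr (fun h => hne (hrun y h))
    simp [List.count_append, hzero, Ne.symm hne]
  have hx_notin : x ∉ collectPairs rest := by
    intro h; rw [ihm x, hcount_rest_x] at h; exact absurd h (by norm_num)
  have hmem_cp : ∀ y ∈ collectPairs rest, x < y := by
    intro y hy
    have : rest.count y = 2 := (ihm y).mp hy
    exact hgt y (List.count_pos_iff.mp (by omega))
  constructor
  · intro y
    by_cases hyx : y = x
    · subst hyx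
      rw [hx_count, collectPairs_cons]
      split_ifs with h
      · simp [hrundef, h]
      · rw [hrundef]
        exact iff_of_false hx_notin h
    · rw [hy_count y hyx, collectPairs_cons]
      split_ifs with h
      · rw [List.mem_cons]
        constructor
        · intro hy; rcases hy with hy | hy
          · exact absurd hy hyx
          · exact (ihm y).mp hy
        · intro hy; exact Or.inr ((ihm y).mpr hy)
      · exact ihm y
  · rw [collectPairs_cons]
    split_ifs with h
    · exact List.pairwise_cons.mpr ⟨hmem_cp, ihp⟩
    · exact ihp

-- main characterisation of collectPairs on a sorted list:
-- its members are exactly the values of count 2, and it is strictly increasing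
lemma collectPairs_spec :
    ∀ (s : List Int), s.Pairwise (· ≤ ·) →
      (∀ y, y ∈ collectPairs s ↔ s.count y = 2) ∧ (collectPairs s).Pairwise (· < ·) := by
  intro s
  induction s using collectPairs.induct with
  | case1 => intro _; simp [collectPairs]
  | case2 x xs run rest h ih => exact collectPairs_step x xs ih
  | case3 x xs run rest h ih => exact collectPairs_step x xs ih

-- the sorted pair list of A equals the run-scan pair list of B
lemma sorted_filter_eq_collectPairs (num : List Int) :
    PySem.List.sorted
        ((PySem.Set.ofList num).foldl
          (fun acc n => if (PySem.List.count num n == 2) then acc ++ [n] else acc) [])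
        (fun x => x) false
      = collectPairs (PySem.List.sorted num (fun x => x) false) := by
  have hfold :
      (PySem.Set.ofList num).foldl
          (fun acc n => if (PySem.List.count num n == 2) then acc ++ [n] else acc) []
        = ((PySem.Set.ofList num : List Int).filter
            (fun n => PySem.List.count num n == 2)).map (fun n => n) := by
    rw [PySem.List.foldl_append_if (fun n => PySem.List.count num n == 2) (fun n => n)]
    simp
  have hs : (PySem.List.sorted num (fun x => x) false).Pairwise (· ≤ ·) :=
    PySem.List.sorted_pairwise num (fun x => x)
  have hperm : (PySem.List.sorted num (fun x => x) false).Perm num :=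
    PySem.List.sorted_perm num (fun x => x) false
  obtain ⟨hmem, hlt⟩ := collectPairs_spec _ hs
  rw [hfold, List.map_id']
  apply PySem.List.sorted_eq_of_perm_of_pairwise_lt
  · rw [List.perm_ext_iff_of_nodup
      (show List.Nodup _ from hlt.imp (fun h => ne_of_lt h))
      ((PySem.Set.nodup_ofList num).filter _)]
    intro y
    rw [hmem y, List.mem_filter, PySem.Set.mem_ofList, hperm.count_eq,
      PySem.List.count_eq, beq_iff_eq]
    constructor
    · intro h; exact ⟨List.count_pos_iff.mp (by omega), h⟩
    · intro h; exact h.2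
  · exact hlt

-- ===== VERDICT (by name: the statement is the Claim_ definition above) =====
theorem paire_spec : Claim_equal_paire := by
  intro num _
  unfold Spec_paire paire paire_alt
  have hEq := sorted_filter_eq_collectPairs num
  set lp := (PySem.Set.ofList num).foldl
      (fun acc n => if (PySem.List.count num n == 2) then acc ++ [n] else acc) [] with hlp
  set cp := collectPairs (PySem.List.sorted num (fun x => x) false) with hcp
  have hlen : cp.length = lp.length := by
    rw [← hEq, PySem.List.length_sorted]
  simp only [hEq, hlen]
  split_ifs with h1 h2
  · rfl
  · -- exactly one pair: sorted of a singleton is itself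
    obtain ⟨a, ha⟩ := List.length_eq_one_iff.mp h2
    rw [← hEq, ha]
    rw [PySem.List.sorted_eq_self_of_pairwise]
    simp
  · rfl
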